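-- pv_equiv track=rewrite | github.com/okaforc/computer-networks | Assignment 2/res/helper.py | updateGraph
-- ===== SOURCE A (Python) =====
-- def addEdge(g: dict, a, b) -> bool:
--     """
--     Add a directed edge between two nodes (addresses) to the digraph given by `g`
--
--     - -
--     Parameters:
--     - `g`: the graph to add the edge to
--     - `a`: the first node of the edge
--     - `b`: the second node of the edge
--     - -
--     Returns:
--     - `boolean`: whether or not the edge is already in the graph
--     """
--
--     if a not in g:
--         g[a] = []
--     if b not in g:
--         g[b] = []
--
--     if b in g[a]:
--         return False
--
--     g[a].append(b)
--     return True
--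
-- def checkSiblings(a: str, b: str):
--     """
--     Check if the subnetworks `a` and `b` are in the same network
--
--     - -
--     Parameters:
--     - `a`: the first network
--     - `b`: the second network
--     - -
--     Returns:
--     - `boolean`: whether or not `a` and `b` are in the same network
--     """
--
--     ta = '.'.join(a.split('.')[:3])
--     tb = '.'.join(b.split('.')[:3])
--     return ta == tb
--
-- def updateGraph(g: dict):
--     """
--     Update the graph `g` and add any new vertices/edges
--
--     - -
--     Parameters:
--     - `g`: the graph to update
--     - -
--     Returns:
--     - `boolean`: whether or not `g` changed
--     """
--
--     changed = False
--
--     for i in g: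
--         for j in g:
--             if i != j:
--                 if checkSiblings(i, j):
--                     changed = addEdge(g, i, j) or changed
--
--     return changed
-- ===== SOURCE B (Python) =====
-- def updateGraph(g: dict):
--     """Update the graph: link every pair of distinct nodes sharing a /24 prefix.
--
--     Buckets nodes by their 3-octet prefix, computes the missing neighbours of
--     each node with a set membership test, applies all extensions, and returns
--     whether anything was added.
--     """
--     buckets = {}
--     for node in g:
--         prefix = '.'.join(node.split('.')[:3])
--         buckets.setdefault(prefix, []).append(node)
--
--     additions = {}
--     for members in buckets.values():
--         for i in members:
--             have = set(g[i])
--             new = [j for j in members if j != i and j not in have]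
--             if new:
--                 additions[i] = new
--
--     for i, new in additions.items():
--         g[i].extend(new)
--
--     return bool(additions)
-- ===== Notes on version B (the rewrite author's own statement) =====
-- stated objective: faster
-- what changed: Replaces A's all-pairs double scan with prefix-comparison per pair by bucketing nodes once by 3-octet prefix, testing membership against a set snapshot of each adjacency list, and applying all edge extensions in a final pass.
import Mathlib
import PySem

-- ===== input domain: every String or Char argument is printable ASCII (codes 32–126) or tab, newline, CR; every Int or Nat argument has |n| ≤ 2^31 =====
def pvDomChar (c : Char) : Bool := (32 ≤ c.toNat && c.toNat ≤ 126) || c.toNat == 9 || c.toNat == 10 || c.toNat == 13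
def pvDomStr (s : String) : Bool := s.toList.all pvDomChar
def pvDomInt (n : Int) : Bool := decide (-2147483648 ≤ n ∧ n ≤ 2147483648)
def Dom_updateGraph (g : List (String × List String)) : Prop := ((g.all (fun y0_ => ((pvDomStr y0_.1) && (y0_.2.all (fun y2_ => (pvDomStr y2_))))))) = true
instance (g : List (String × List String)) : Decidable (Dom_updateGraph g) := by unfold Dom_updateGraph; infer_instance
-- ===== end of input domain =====

-- B buckets the nodes once by /24 prefix and uses set membership instead of A's
-- all-pairs scan with a per-pair prefix comparison and a list membership test.
-- Both Pythons extend the argument's adjacency lists in place identically; the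
-- equivalence proved here is about the RETURN value (the Bool).

-- ===== PORT A =====
-- checkSiblings(a, b): '.'.join(a.split('.')[:3]) == '.'.join(b.split('.')[:3]);
-- [:3] on a list is List.take 3 (exact, stop ≥ 0); split? with the literal
-- non-empty separator "." is always `some`, getD [] only unwraps it.
def checkSiblings (a : String) (b : String) : Bool :=
  let ta := PySem.Str.join "." (((PySem.Str.split? a ".").getD []).take 3)
  let tb := PySem.Str.join "." (((PySem.Str.split? b ".").getD []).take 3)
  ta == tb

-- addEdge(g, a, b): returns (added?, updated dict); g[a] is read with getD (a is present after the guard)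
def addEdge (g : PySem.Dict String (List String)) (a : String) (b : String) :
    Bool × PySem.Dict String (List String) :=
  let g1 := if g.contains a then g else g.insert a []
  let g2 := if g1.contains b then g1 else g1.insert b []
  if (g2.getD a []).contains b then (false, g2)
  else (true, g2.modify a [] (fun l => l ++ [b]))

-- 'for i in g: for j in g: …' iterates the dict's keys; no key is ever added or
-- removed during the loops (every i and j is already a key), so both loops run
-- over the initial key list.
def updateGraph (g : List (String × List String)) : Bool :=
  let d := PySem.Dict.ofList g
  let ks := d.keys
  let res := ks.foldl (fun (st : Bool × PySem.Dict String (List String)) i =>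
    ks.foldl (fun (st : Bool × PySem.Dict String (List String)) j =>
      if i ≠ j then
        if checkSiblings i j then
          let r := addEdge st.2 i j
          (r.1 || st.1, r.2)
        else st
      else st) st) (false, d)
  res.1

-- ===== PORT B =====
-- '.'.join(node.split('.')[:3])  (same remark as above: split? "." is always some)
def pvPrefix3 (node : String) : String :=
  PySem.Str.join "." (((PySem.Str.split? node ".").getD []).take 3)

-- the final 'for i, new in additions.items(): g[i].extend(new)' pass only
-- mutates the argument in place; the return value is bool(additions).
def updateGraph_alt (g : List (String × List String)) : Bool :=
  let d := PySem.Dict.ofList g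
  let buckets := d.keys.foldl
    (fun (bk : PySem.Dict String (List String)) node =>
      bk.modify (pvPrefix3 node) [] (fun ms => ms ++ [node])) PySem.Dict.empty
  let additions := buckets.values.foldl
    (fun (ad : PySem.Dict String (List String)) members =>
      members.foldl (fun (ad : PySem.Dict String (List String)) i =>
        let haveS : PySem.Set String := PySem.Set.ofList (d.getD i [])
        let newL := members.filter (fun j => j != i && !(PySem.Set.contains haveS j))
        if newL.isEmpty then ad else ad.insert i newL) ad) PySem.Dict.empty
  !(additions.size == 0)

-- ===== PRECONDITION & SPEC =====
def Spec_updateGraph (g : List (String × List String)) (out : Bool) : Prop := out = updateGraph_alt g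
instance (g : List (String × List String)) (out : Bool) : Decidable (Spec_updateGraph g out) := by unfold Spec_updateGraph; infer_instance

-- ===== CLAIM (what is proved, stated in full; the proofs are below) =====
def Claim_equal_updateGraph : Prop := ∀ (g : List (String × List String)), Dom_updateGraph g → Spec_updateGraph g (updateGraph g)

-- ===== LEMMAS AND PROOFS =====

-- the condition under which A adds the edge i → j (w.r.t. the ORIGINAL adjacency of i)
def pvCond (d0 : PySem.Dict String (List String)) (i j : String) : Bool :=
  decide (i ≠ j) && checkSiblings i j && !((d0.getD i []).contains j)

theorem pv_checkSib (a b : String) : checkSiblings a b = (pvPrefix3 a == pvPrefix3 b) := rfl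

-- A's inner loop over js: the flag picks up `pvCond`, only key i's list grows
theorem pv_inner_loop (d0 : PySem.Dict String (List String)) (i : String) :
    ∀ (js : List String) (c : Bool) (d : PySem.Dict String (List String)) (extra : List String),
      js.Nodup →
      d.contains i = true →
      (∀ j ∈ js, d.contains j = true) →
      d.getD i [] = d0.getD i [] ++ extra →
      (∀ j ∈ js, j ∉ extra) →
      (js.foldl (fun (st : Bool × PySem.Dict String (List String)) j =>
        if i ≠ j then
          if checkSiblings i j then
            ((addEdge st.2 i j).1 || st.1, (addEdge st.2 i j).2)
          else st
        else st) (c, d)).1 = (c || js.any (fun j => pvCond d0 i j))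
      ∧ (∀ k, k ≠ i → (js.foldl (fun (st : Bool × PySem.Dict String (List String)) j =>
        if i ≠ j then
          if checkSiblings i j then
            ((addEdge st.2 i j).1 || st.1, (addEdge st.2 i j).2)
          else st
        else st) (c, d)).2.getD k [] = d.getD k [])
      ∧ (∀ k, (js.foldl (fun (st : Bool × PySem.Dict String (List String)) j =>
        if i ≠ j then
          if checkSiblings i j then
            ((addEdge st.2 i j).1 || st.1, (addEdge st.2 i j).2)
          else st
        else st) (c, d)).2.contains k = d.contains k) := by
  intro js
  induction js with
  | nil => intro c d extra _ _ _ _ _; simp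
  | cons j js ih =>
    intro c d extra hnd hci hcall hgd hex
    obtain ⟨hjnot, hndj⟩ := List.nodup_cons.mp hnd
    have hcj : d.contains j = true := hcall j (by simp)
    simp only [List.foldl_cons]
    by_cases hij : i ≠ j
    · rw [if_pos hij]
      by_cases hs : checkSiblings i j = true
      · rw [if_pos hs]
        have hAE : addEdge d i j =
            (if (d.getD i []).contains j then (false, d)
             else (true, d.modify i [] (fun l => l ++ [j]))) := by
          simp [addEdge, hci, hcj]
        have hjex : j ∉ extra := hex j (by simp)
        have hcontains : (d.getD i []).contains j = (d0.getD i []).contains j := by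
          rw [hgd]
          simp
          intro h
          exact absurd h hjex
        by_cases hin : (d0.getD i []).contains j = true
        · -- edge already present: nothing changes
          rw [hAE]
          rw [hcontains, if_pos hin]
          have hco : pvCond d0 i j = false := by
            have hmem : j ∈ d0.getD i [] := by simpa using hin
            simp [pvCond, hmem]
          obtain ⟨h1, h2, h3⟩ := ih (false || c) d extra hndj hci
            (fun j' hj' => hcall j' (by simp [hj'])) hgd
            (fun j' hj' => hex j' (by simp [hj']))
          refine ⟨?_, h2, h3⟩
          rw [h1]; simp [hco]
        · -- edge added
          have hin' : (d.getD i []).contains j = false := by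
            rw [hcontains]; simpa using hin
          rw [hAE, hcontains, if_neg (by simpa using hin)]
          have hco : pvCond d0 i j = true := by
            simp [pvCond, hij, hs]; simpa using hin
          set d' := d.modify i [] (fun l => l ++ [j]) with hd'
          obtain ⟨h1, h2, h3⟩ := ih (true || c) d' (extra ++ [j]) hndj
            (by simp [hd', PySem.Dict.contains_modify, hci])
            (fun j' hj' => by simp [hd', PySem.Dict.contains_modify, hcall j' (by simp [hj'])])
            (by rw [hd', PySem.Dict.getD_modify_self, hgd, List.append_assoc])
            (fun j' hj' => by
              intro hmem
              rcases List.mem_append.mp hmem with h | h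
              · exact hex j' (by simp [hj']) h
              · simp at h; exact hjnot (h ▸ hj'))
          refine ⟨?_, ?_, ?_⟩
          · rw [h1]; simp [hco]
          · intro k hk
            rw [h2 k hk, hd']
            exact PySem.Dict.getD_modify_of_ne d [] (fun l => l ++ [j]) hk
          · intro k
            rw [h3 k, hd', PySem.Dict.contains_modify]
            by_cases hk : k = i
            · subst hk; simp [hci]
            · simp [hk]
      · rw [if_neg hs]
        have hco : pvCond d0 i j = false := by simp [pvCond, hs]
        obtain ⟨h1, h2, h3⟩ := ih c d extra hndj hci
          (fun j' hj' => hcall j' (by simp [hj'])) hgd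
          (fun j' hj' => hex j' (by simp [hj']))
        refine ⟨?_, h2, h3⟩
        rw [h1]; simp [hco]
    · rw [if_neg hij]
      have hco : pvCond d0 i j = false := by simp [pvCond, hij]
      obtain ⟨h1, h2, h3⟩ := ih c d extra hndj hci
        (fun j' hj' => hcall j' (by simp [hj'])) hgd
        (fun j' hj' => hex j' (by simp [hj']))
      refine ⟨h1.trans ?_, h2, h3⟩
      simp [hco]

-- A's outer loop: the flag becomes the double `any`
theorem pv_outer_loop (d0 : PySem.Dict String (List String)) (ks : List String)
    (hks : ks.Nodup) :
    ∀ (is : List String) (c : Bool) (d : PySem.Dict String (List String)),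
      is.Nodup →
      (∀ k ∈ ks, d.contains k = true) →
      (∀ i ∈ is, d.contains i = true) →
      (∀ i ∈ is, d.getD i [] = d0.getD i []) →
      (is.foldl (fun (st : Bool × PySem.Dict String (List String)) i =>
        ks.foldl (fun (st : Bool × PySem.Dict String (List String)) j =>
          if i ≠ j then
            if checkSiblings i j then
              ((addEdge st.2 i j).1 || st.1, (addEdge st.2 i j).2)
            else st
          else st) st) (c, d)).1
      = (c || is.any (fun i => ks.any (fun j => pvCond d0 i j))) := by
  intro is
  induction is with
  | nil => intro c d _ _ _ _; simp
  | cons i is ih =>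
    intro c d hnd hall hcis hgis
    obtain ⟨hinot, hndi⟩ := List.nodup_cons.mp hnd
    simp only [List.foldl_cons]
    have hgd : d.getD i [] = d0.getD i [] ++ [] := by
      rw [List.append_nil]; exact hgis i (by simp)
    obtain ⟨h1, h2, h3⟩ := pv_inner_loop d0 i ks c d [] hks
      (hcis i (by simp)) hall hgd (by simp)
    set st1 := ks.foldl (fun (st : Bool × PySem.Dict String (List String)) j =>
      if i ≠ j then
        if checkSiblings i j then
          ((addEdge st.2 i j).1 || st.1, (addEdge st.2 i j).2)
        else st
      else st) (c, d) with hst1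
    have hpair : st1 = (st1.1, st1.2) := rfl
    rw [hpair, h1]
    rw [ih _ st1.2 hndi
      (fun k hk => (h3 k).trans (hall k hk))
      (fun i' hi' => (h3 i').trans (hcis i' (by simp [hi'])))
      (fun i' hi' => by
        have hne : i' ≠ i := fun h => hinot (h ▸ hi')
        rw [h2 i' hne]; exact hgis i' (by simp [hi']))]
    simp [Bool.or_assoc]

-- A computes: is there an ordered pair of distinct keys with equal /24 prefix whose edge is missing?
theorem pv_A_char (g : List (String × List String)) :
    updateGraph g = ((PySem.Dict.ofList g).keys.any (fun i =>
      (PySem.Dict.ofList g).keys.any (fun j => pvCond (PySem.Dict.ofList g) i j))) := by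
  simp only [updateGraph]
  rw [pv_outer_loop (PySem.Dict.ofList g) (PySem.Dict.ofList g).keys
    (PySem.Dict.nodup_keys_ofList g) (PySem.Dict.ofList g).keys false (PySem.Dict.ofList g)
    (PySem.Dict.nodup_keys_ofList g)
    (fun k hk => (PySem.Dict.contains_iff_mem_keys _ k).mpr hk)
    (fun k hk => (PySem.Dict.contains_iff_mem_keys _ k).mpr hk)
    (fun _ _ => rfl)]
  simp

-- ---- B side ----

-- the list of missing sibling neighbours of i within its bucket `m`
def pvNew (d0 : PySem.Dict String (List String)) (m : List String) (i : String) : List String :=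
  m.filter (fun j => j != i && !(PySem.Set.contains (PySem.Set.ofList (d0.getD i [])) j))

theorem pvNew_def (d0 : PySem.Dict String (List String)) (m : List String) (i : String) :
    m.filter (fun j => j != i && !(PySem.Set.contains (PySem.Set.ofList (d0.getD i [])) j))
    = pvNew d0 m i := rfl

theorem pv_size_le (d0 : PySem.Dict String (List String)) (m : List String) :
    ∀ (l : List String) (ad : PySem.Dict String (List String)),
      ad.size ≤ (l.foldl (fun ad i =>
        if (pvNew d0 m i).isEmpty then ad else ad.insert i (pvNew d0 m i)) ad).size := by
  intro l
  induction l with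
  | nil => intro ad; simp
  | cons i l ih =>
    intro ad
    simp only [List.foldl_cons]
    by_cases h : (pvNew d0 m i).isEmpty
    · rw [if_pos h]; exact ih ad
    · rw [if_neg h]
      refine le_trans ?_ (ih _)
      rw [PySem.Dict.size_insert]
      split_ifs <;> omega

theorem pv_inner_zero (d0 : PySem.Dict String (List String)) (m : List String) :
    ∀ (l : List String) (ad : PySem.Dict String (List String)),
      ((l.foldl (fun ad i =>
        if (pvNew d0 m i).isEmpty then ad else ad.insert i (pvNew d0 m i)) ad).size = 0)
      ↔ (ad.size = 0 ∧ ∀ i ∈ l, pvNew d0 m i = []) := by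
  intro l
  induction l with
  | nil => intro ad; simp
  | cons i l ih =>
    intro ad
    simp only [List.foldl_cons]
    by_cases h : (pvNew d0 m i).isEmpty
    · rw [if_pos h]
      rw [ih ad]
      have he : pvNew d0 m i = [] := by simpa [List.isEmpty_iff] using h
      constructor
      · rintro ⟨h1, h2⟩
        exact ⟨h1, fun i' hi' => by
          rcases List.mem_cons.mp hi' with h' | h'
          · exact h' ▸ he
          · exact h2 i' h'⟩
      · rintro ⟨h1, h2⟩
        exact ⟨h1, fun i' hi' => h2 i' (by simp [hi'])⟩
    · rw [if_neg h]
      constructor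
      · intro hz
        exfalso
        have hle := pv_size_le d0 m l (ad.insert i (pvNew d0 m i))
        rw [hz] at hle
        have : 1 ≤ (ad.insert i (pvNew d0 m i)).size := by
          rw [PySem.Dict.size_insert]
          split_ifs with hc
          · have := (PySem.Dict.contains_iff_mem_keys ad i).mp hc
            have : ad.keys ≠ [] := by intro hh; rw [hh] at this; simp at this
            have : 0 < ad.keys.length := List.length_pos_iff.mpr this
            simpa [PySem.Dict.size, PySem.Dict.keys] using Nat.lt_of_lt_of_le this (by
              simp [PySem.Dict.keys, List.length_map])
          · omega
        omega
      · rintro ⟨_, h2⟩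
        exfalso
        exact h (by simp [h2 i (by simp)])

theorem pv_outer_zero (d0 : PySem.Dict String (List String)) :
    ∀ (vs : List (List String)) (ad : PySem.Dict String (List String)),
      ((vs.foldl (fun ad m => m.foldl (fun ad i =>
        if (pvNew d0 m i).isEmpty then ad else ad.insert i (pvNew d0 m i)) ad) ad).size = 0)
      ↔ (ad.size = 0 ∧ ∀ m ∈ vs, ∀ i ∈ m, pvNew d0 m i = []) := by
  intro vs
  induction vs with
  | nil => intro ad; simp
  | cons m vs ih =>
    intro ad
    simp only [List.foldl_cons]
    rw [ih, pv_inner_zero]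
    constructor
    · rintro ⟨⟨h0, hm⟩, hrest⟩
      refine ⟨h0, fun m' hm' => ?_⟩
      rcases List.mem_cons.mp hm' with h' | h'
      · exact h' ▸ hm
      · exact hrest m' h'
    · rintro ⟨h0, hall⟩
      exact ⟨⟨h0, hall m (by simp)⟩, fun m' hm' => hall m' (by simp [hm'])⟩

-- membership characterisations
theorem pv_cond_iff (d0 : PySem.Dict String (List String)) (i j : String) :
    pvCond d0 i j = true ↔ i ≠ j ∧ pvPrefix3 i = pvPrefix3 j ∧ j ∉ d0.getD i [] := by
  simp [pvCond, pv_checkSib, and_assoc]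

theorem pv_new_mem (d0 : PySem.Dict String (List String)) (m : List String) (i j : String) :
    j ∈ pvNew d0 m i ↔ j ∈ m ∧ j ≠ i ∧ j ∉ d0.getD i [] := by
  simp [pvNew, List.mem_filter, PySem.Set.contains]

-- B computes the same Bool
theorem pv_B_char (g : List (String × List String)) :
    updateGraph_alt g = ((PySem.Dict.ofList g).keys.any (fun i =>
      (PySem.Dict.ofList g).keys.any (fun j => pvCond (PySem.Dict.ofList g) i j))) := by
  simp only [updateGraph_alt]
  set d0 := PySem.Dict.ofList g with hd0
  set K := d0.keys with hK
  set buckets := K.foldl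
    (fun (bk : PySem.Dict String (List String)) node =>
      bk.modify (pvPrefix3 node) [] (fun ms => ms ++ [node])) PySem.Dict.empty with hbuckets
  -- bucket contents and keys
  have hbget : ∀ p, buckets.getD p [] = K.filter (fun n => pvPrefix3 n == p) := by
    intro p
    rw [hbuckets]
    rw [show (K.foldl (fun (bk : PySem.Dict String (List String)) node =>
        bk.modify (pvPrefix3 node) [] (fun ms => ms ++ [node])) PySem.Dict.empty)
      = ((K.map (fun n => (pvPrefix3 n, n))).foldl
        (fun (bk : PySem.Dict String (List String)) q =>
          bk.modify q.1 [] (fun ms => ms ++ [q.2])) PySem.Dict.empty) from by rw [List.foldl_map]]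
    rw [PySem.Dict.getD_foldl_modify_append]
    simp [List.filter_map, Function.comp_def]
  have hbnodup : buckets.keys.Nodup := by
    rw [hbuckets]
    exact PySem.Dict.nodup_keys_foldl_modify_key K pvPrefix3 []
      (fun _ node => (fun ms => ms ++ [node])) PySem.Dict.empty (by simp)
  have hbkeys : ∀ p, p ∈ buckets.keys ↔ p ∈ K.map pvPrefix3 := by
    intro p
    rw [hbuckets,
      PySem.Dict.keys_foldl_modify_key K pvPrefix3 []
        (fun _ node => (fun ms => ms ++ [node])) PySem.Dict.empty]
    show p ∈ PySem.Set.update PySem.Dict.empty.keys (K.map pvPrefix3) ↔ _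
    rw [show PySem.Set.update (PySem.Dict.empty (κ := String) (ν := List String)).keys (K.map pvPrefix3)
        = PySem.Set.ofList (K.map pvPrefix3) from rfl]
    exact PySem.Set.mem_ofList _ _
  have hvals : buckets.values = buckets.keys.map (fun p => buckets.getD p []) :=
    PySem.Dict.values_eq_map_keys buckets hbnodup []
  -- fold the filter into pvNew
  simp only [pvNew_def]
  -- characterise when no addition fires
  have hmain : ((buckets.values.foldl (fun (ad : PySem.Dict String (List String)) m =>
      m.foldl (fun ad i =>
        if (pvNew d0 m i).isEmpty then ad else ad.insert i (pvNew d0 m i)) ad)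
      PySem.Dict.empty).size = 0)
      ↔ ¬ (K.any (fun i => K.any (fun j => pvCond d0 i j)) = true) := by
    rw [pv_outer_zero]
    constructor
    · rintro ⟨_, hall⟩ hany
      simp only [List.any_eq_true] at hany
      obtain ⟨i, hiK, j, hjK, hcij⟩ := hany
      obtain ⟨hij, hsib, hnc⟩ := (pv_cond_iff d0 i j).mp hcij
      set p := pvPrefix3 i with hp
      have hpmem : p ∈ buckets.keys := (hbkeys p).mpr (List.mem_map.mpr ⟨i, hiK, rfl⟩)
      have hmmem : buckets.getD p [] ∈ buckets.values :=
        hvals ▸ List.mem_map.mpr ⟨p, hpmem, rfl⟩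
      have hnew := hall _ hmmem i (by
        rw [hbget]
        exact List.mem_filter.mpr ⟨hiK, by rw [hp]; exact beq_self_eq_true (pvPrefix3 i)⟩)
      have hjmem : j ∈ pvNew d0 (buckets.getD p []) i := by
        refine (pv_new_mem d0 _ i j).mpr ⟨?_, fun h => hij h.symm, hnc⟩
        rw [hbget]
        exact List.mem_filter.mpr ⟨hjK, by rw [← hsib, hp]; exact beq_self_eq_true (pvPrefix3 i)⟩
      rw [hnew] at hjmem
      simp at hjmem
    · intro hnot
      refine ⟨rfl, fun m hm i him => ?_⟩
      obtain ⟨p, hpmem, rfl⟩ := List.mem_map.mp (hvals ▸ hm)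
      rw [List.eq_nil_iff_forall_not_mem]
      intro j hj
      obtain ⟨hjm, hjne, hjnc⟩ := (pv_new_mem d0 _ i j).mp hj
      rw [hbget] at him hjm
      obtain ⟨hiK, hip⟩ := List.mem_filter.mp him
      obtain ⟨hjK, hjp⟩ := List.mem_filter.mp hjm
      apply hnot
      simp only [List.any_eq_true]
      refine ⟨i, hiK, j, hjK, (pv_cond_iff d0 i j).mpr ⟨fun h => hjne h.symm, ?_, hjnc⟩⟩
      have h1 : pvPrefix3 i = p := by simpa using hip
      have h2 : pvPrefix3 j = p := by simpa using hjp
      rw [h1, h2]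
  cases hA : (K.any (fun i => K.any (fun j => pvCond d0 i j))) with
  | false =>
    rw [hmain.mpr (by simp [hA])]
    rfl
  | true =>
    have hz : ¬ ((buckets.values.foldl (fun (ad : PySem.Dict String (List String)) m =>
        m.foldl (fun ad i =>
          if (pvNew d0 m i).isEmpty then ad else ad.insert i (pvNew d0 m i)) ad)
        PySem.Dict.empty).size = 0) := fun h => (hmain.mp h) hA
    have hb : ((buckets.values.foldl (fun (ad : PySem.Dict String (List String)) m =>
        m.foldl (fun ad i =>
          if (pvNew d0 m i).isEmpty then ad else ad.insert i (pvNew d0 m i)) ad)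
        PySem.Dict.empty).size == 0) = false := by
      rw [beq_eq_false_iff_ne]
      exact hz
    rw [hb]
    rfl

-- ===== VERDICT (by name: the statement is the Claim_ definition above) =====
theorem updateGraph_spec : Claim_equal_updateGraph := by
  intro g _
  unfold Spec_updateGraph
  rw [pv_A_char, pv_B_char]
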